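-- pv_equiv track=rewrite | github.com/pypi-data/pypi-mirror-307 | packages/tennis-transcriptome/tennis_transcriptome-0.0.1-py3-none-any.whl/tennis/main.py | __get_partial_any_chain_matrix
-- ===== SOURCE A (Python) =====
-- def __get_partial_any_chain_matrix(original_matrix):
--     M = []
--     for isoforms_in_gene in original_matrix:
--         all_sites = set()
--         for exons_in_isoform in isoforms_in_gene:
--             for ex in exons_in_isoform:
--                 all_sites.add(ex[0])
--                 all_sites.add(ex[1] + 1)
--         all_sites = sorted(list(all_sites))
--         idx_sites = dict()
--         for idx, site in enumerate(all_sites):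
--             idx_sites[site] = idx
--
--         pexonchain_in_gene = []
--         for exons_in_isoform in isoforms_in_gene:
--             pexon_chain = []
--             for ex in exons_in_isoform:
--                 idx1 = idx_sites[ex[0]]
--                 idx2 = idx_sites[ex[1] + 1]
--                 assert idx1 <= idx2
--                 pex_in_ex = []
--                 for i in range(idx1, idx2):
--                     pex_in_ex.append((all_sites[i], all_sites[i + 1] - 1))
--                 if idx1 == idx2:
--                     pex_in_ex.append((all_sites[idx1], all_sites[idx1] - 1))
--                 assert len(pex_in_ex) >= 1
--                 assert pex_in_ex[0][0] == ex[0]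
--
--                 for i, pex in enumerate(pex_in_ex):
--                     if i == 0:
--                         assert pex_in_ex[0][0] == ex[0]
--                     elif i == len(pex_in_ex) - 1:
--                         assert pex_in_ex[-1][1] == ex[1]
--                         break
--                     if i < len(pex_in_ex) - 1:
--                         assert pex_in_ex[i][1] < pex_in_ex[i + 1][0] # inclusive
--
--                 pexon_chain.extend(pex_in_ex)
--             pexonchain_in_gene.append(pexon_chain)
--         M.append(pexonchain_in_gene)
--     return M
-- ===== SOURCE B (Python) =====
-- def __get_partial_any_chain_matrix(original_matrix):
--     # Simpler decomposition: per gene build one shared partial-exon segment table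
--     # from consecutive sorted breakpoint sites, then each exon just selects the
--     # segments whose start lies inside it (no index dict, no per-exon range loop).
--     # The one assert of A that can actually fail (a reversed exon) is kept; the
--     # always-true validation asserts are dropped.
--     def pick(segs, ex):
--         assert ex[0] <= ex[1] + 1
--         return ([sg for sg in segs if ex[0] <= sg[0] <= ex[1]]
--                 or [(ex[0], ex[0] - 1)])
--     M = []
--     for gene in original_matrix:
--         sites = sorted({s for iso in gene for ex in iso for s in (ex[0], ex[1] + 1)})
--         segs = [(a, b - 1) for a, b in zip(sites, sites[1:])]
--         M.append([[p for ex in iso for p in pick(segs, ex)] for iso in gene])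
--     return M
-- ===== Notes on version B (the rewrite author's own statement) =====
-- stated objective: simpler
-- what changed: B replaces A's per-exon index-dict lookups, per-exon range loops and always-true validation asserts by one shared per-gene segment table built from consecutive sorted sites, from which each exon selects its segments by a bounds filter (degenerate segment when none match); the one assert that can fail (reversed exon) is kept.
import Mathlib
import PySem

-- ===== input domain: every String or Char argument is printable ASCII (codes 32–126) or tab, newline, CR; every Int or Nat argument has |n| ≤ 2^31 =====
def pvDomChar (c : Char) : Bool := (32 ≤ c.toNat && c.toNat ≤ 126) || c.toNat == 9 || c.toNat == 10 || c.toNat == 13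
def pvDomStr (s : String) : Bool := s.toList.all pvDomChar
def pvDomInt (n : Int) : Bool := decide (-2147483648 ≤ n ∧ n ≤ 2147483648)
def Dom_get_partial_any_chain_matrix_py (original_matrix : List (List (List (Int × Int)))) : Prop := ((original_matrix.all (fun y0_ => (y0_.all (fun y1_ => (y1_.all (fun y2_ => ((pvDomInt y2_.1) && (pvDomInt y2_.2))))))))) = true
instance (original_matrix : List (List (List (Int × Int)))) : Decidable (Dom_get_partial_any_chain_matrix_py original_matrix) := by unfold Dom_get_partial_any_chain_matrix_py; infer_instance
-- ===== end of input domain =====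

-- B builds one shared per-gene segment table from consecutive sorted sites and lets each exon
-- select its segments by a bounds filter, replacing A's index dict and per-exon range loops (A's always-true validation asserts are dropped; the one that can fail is kept in B and excluded by Pre_).


-- ===== PORT A =====
def get_partial_any_chain_matrix_py (original_matrix : List (List (List (Int × Int)))) : List (List (List (Int × Int))) :=
  original_matrix.foldl (fun M isoforms_in_gene =>
    let all_sites_set : PySem.Set Int :=
      isoforms_in_gene.foldl (fun s exons_in_isoform =>
        exons_in_isoform.foldl (fun s ex =>
          PySem.Set.add (PySem.Set.add s ex.1) (ex.2 + 1)) s) PySem.Set.empty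
    let all_sites := PySem.List.sorted all_sites_set (fun x => x) false
    let idx_sites : PySem.Dict Int Int :=
      (PySem.List.enumerate all_sites 0).foldl (fun d p => d.insert p.2 p.1) PySem.Dict.empty
    let pexonchain_in_gene := isoforms_in_gene.foldl (fun pc exons_in_isoform =>
      let pexon_chain := exons_in_isoform.foldl (fun chain ex =>
        let idx1 := idx_sites.getD ex.1 0        -- KeyError impossible: ex.1 was added to the set above
        let idx2 := idx_sites.getD (ex.2 + 1) 0  -- likewise for ex.2 + 1
        -- 'assert idx1 <= idx2' raises exactly when ex.1 > ex.2 + 1; those inputs are excluded by Pre_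
        let pex_in_ex := (PySem.List.pyRange idx1 idx2 1).foldl (fun pex i =>
          pex ++ [(PySem.List.pyGetD all_sites i 0, PySem.List.pyGetD all_sites (i + 1) 0 - 1)]) []
        let pex_in_ex := if idx1 = idx2 then
            pex_in_ex ++ [(PySem.List.pyGetD all_sites idx1 0, PySem.List.pyGetD all_sites idx1 0 - 1)]
          else pex_in_ex
        -- the remaining asserts of A always hold on inputs admitted by Pre_ (they only read pex_in_ex)
        chain ++ pex_in_ex) []
      pc ++ [pexon_chain]) []
    M ++ [pexonchain_in_gene]) []

-- ===== PORT B =====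
def get_partial_any_chain_matrix_py_alt (original_matrix : List (List (List (Int × Int)))) : List (List (List (Int × Int))) :=
  original_matrix.foldl (fun M gene =>
    let sites := PySem.List.sorted
      (PySem.Set.ofList (gene.flatMap (fun iso => iso.flatMap (fun ex => [ex.1, ex.2 + 1]))))
      (fun x => x) false
    let segs := (sites.zip sites.tail).map (fun p => (p.1, p.2 - 1))
    M ++ [gene.map (fun iso => iso.flatMap (fun ex =>
      let fl := segs.filter (fun sg => decide (ex.1 ≤ sg.1) && decide (sg.1 ≤ ex.2))
      if fl = [] then [(ex.1, ex.1 - 1)] else fl))]) []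

-- ===== PRECONDITION & SPEC =====
-- Pre_ excludes exactly the inputs on which the Python A raises AssertionError
-- ('assert idx1 <= idx2' fails iff some exon has ex[0] > ex[1] + 1); A returns on all other inputs.
def Pre_get_partial_any_chain_matrix_py (original_matrix : List (List (List (Int × Int)))) : Prop :=
  (original_matrix.all (fun gene => gene.all (fun iso => iso.all (fun ex => decide (ex.1 ≤ ex.2 + 1))))) = true
instance (original_matrix : List (List (List (Int × Int)))) : Decidable (Pre_get_partial_any_chain_matrix_py original_matrix) := by unfold Pre_get_partial_any_chain_matrix_py; infer_instance
def pvWitness_get_partial_any_chain_matrix_py : (List (List (List (Int × Int)))) := [[[(1, 3), (4, 4)], [(1, 4)]]]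
def Spec_get_partial_any_chain_matrix_py (original_matrix : List (List (List (Int × Int)))) (out : List (List (List (Int × Int)))) : Prop := out = get_partial_any_chain_matrix_py_alt original_matrix
instance (original_matrix : List (List (List (Int × Int)))) (out : List (List (List (Int × Int)))) : Decidable (Spec_get_partial_any_chain_matrix_py original_matrix out) := by unfold Spec_get_partial_any_chain_matrix_py; infer_instance

-- ===== CLAIM (what is proved, stated in full; the proofs are below) =====
def Claim_equal_get_partial_any_chain_matrix_py : Prop := ∀ (original_matrix : List (List (List (Int × Int)))), Dom_get_partial_any_chain_matrix_py original_matrix → Pre_get_partial_any_chain_matrix_py original_matrix → Spec_get_partial_any_chain_matrix_py original_matrix (get_partial_any_chain_matrix_py original_matrix)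

-- ===== LEMMAS AND PROOFS =====

-- A's nested set-building loop is the fold of Set.add over the flattened site list.
theorem pv_setfold_inner (iso : List (Int × Int)) (s : PySem.Set Int) :
    iso.foldl (fun s ex => PySem.Set.add (PySem.Set.add s ex.1) (ex.2 + 1)) s
      = (iso.flatMap (fun ex => [ex.1, ex.2 + 1])).foldl PySem.Set.add s := by
  induction iso generalizing s with
  | nil => rfl
  | cons ex t ih => simp only [List.flatMap_cons, List.foldl_append, List.foldl_cons, ih, List.foldl_nil]

theorem pv_setfold_gen (gene : List (List (Int × Int))) (s : PySem.Set Int) :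
    gene.foldl (fun s iso => iso.foldl (fun s ex => PySem.Set.add (PySem.Set.add s ex.1) (ex.2 + 1)) s) s
      = (gene.flatMap (fun iso => iso.flatMap (fun ex => [ex.1, ex.2 + 1]))).foldl PySem.Set.add s := by
  induction gene generalizing s with
  | nil => rfl
  | cons iso t ih =>
      rw [List.foldl_cons, ih, pv_setfold_inner, List.flatMap_cons, List.foldl_append]

theorem pv_setfold (gene : List (List (Int × Int))) :
    gene.foldl (fun s iso => iso.foldl (fun s ex => PySem.Set.add (PySem.Set.add s ex.1) (ex.2 + 1)) s) PySem.Set.empty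
      = PySem.Set.ofList (gene.flatMap (fun iso => iso.flatMap (fun ex => [ex.1, ex.2 + 1]))) := by
  rw [PySem.Set.ofList_eq_foldl]
  exact pv_setfold_gen gene PySem.Set.empty

-- the enumerate-insert dict leaves absent keys alone …
theorem pv_dict_notmem (xs : List Int) (a : Int) (d : PySem.Dict Int Int) (v : Int) (h : v ∉ xs) :
    ((PySem.List.enumerate xs a).foldl (fun d p => d.insert p.2 p.1) d).getD v 0 = d.getD v 0 := by
  induction xs generalizing a d with
  | nil => rfl
  | cons x t ih =>
      simp only [PySem.List.enumerate_cons, List.foldl_cons]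
      rw [ih _ _ (by simp_all)]
      rw [PySem.Dict.getD_insert]
      simp_all

-- … and maps each site of a Nodup list to its index.
theorem pv_dict_mem (xs : List Int) (a : Int) (d : PySem.Dict Int Int) (hnd : xs.Nodup)
    (k : Nat) (hk : k < xs.length) :
    ((PySem.List.enumerate xs a).foldl (fun d p => d.insert p.2 p.1) d).getD xs[k] 0 = a + k := by
  induction xs generalizing a d k with
  | nil => simp at hk
  | cons x t ih =>
      simp only [PySem.List.enumerate_cons, List.foldl_cons]
      cases k with
      | zero =>
          rw [pv_dict_notmem _ _ _ _ (by simp_all)]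
          rw [PySem.Dict.getD_insert]
          simp
      | succ k =>
          simp only [List.getElem_cons_succ]
          rw [ih (a + 1) (d.insert x a) hnd.of_cons k (by simpa using hk)]
          push_cast; ring

-- zip(sites, sites[1:]) indexed through pyGetD
theorem pv_zip_tail (xs : List Int) :
    xs.zip xs.tail = (PySem.List.pyRange 0 ((xs.length : Int) - 1) 1).map
      (fun j => (PySem.List.pyGetD xs j 0, PySem.List.pyGetD xs (j + 1) 0)) := by
  apply List.ext_getElem
  · simp only [List.length_zip, List.length_tail, List.length_map, PySem.List.length_pyRange_one]
    omega
  · intro i h1 h2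
    have hi : i + 1 < xs.length := by
      simp [List.length_tail] at h1; omega
    have hr : ∀ h : i < (PySem.List.pyRange 0 ((xs.length : Int) - 1) 1).length,
        (PySem.List.pyRange 0 ((xs.length : Int) - 1) 1)[i] = (i : Int) := by
      intro h; rw [PySem.List.getElem_pyRange_one]; ring
    have hga : PySem.List.pyGetD xs ((i : Nat) : Int) 0 = xs[i]'(by omega) := by
      rw [PySem.List.pyGetD_eq_getElem xs 0 (by positivity) (by exact_mod_cast (by omega : i < xs.length))]
      simp
    have hgb : PySem.List.pyGetD xs (((i : Nat) : Int) + 1) 0 = xs[i + 1]'hi := by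
      have hcast : (((i : Nat) : Int) + 1) = (((i + 1 : Nat) : Nat) : Int) := by push_cast; ring
      rw [hcast, PySem.List.pyGetD_eq_getElem xs 0 (by positivity) (by exact_mod_cast hi)]
      simp
    simp only [List.getElem_zip, List.getElem_map, hr, List.getElem_tail, hga, hgb]

-- filtering a unit range by an interval condition
theorem pv_range_filter (a b c d : Int) (hac : a ≤ c) (hcd : c ≤ d) (hdb : d ≤ b) :
    (PySem.List.pyRange a b 1).filter (fun j => decide (c ≤ j) && decide (j < d))
      = PySem.List.pyRange c d 1 := by
  rw [PySem.List.pyRange_one_append a c b hac (by omega),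
      PySem.List.pyRange_one_append c d b hcd hdb,
      List.filter_append, List.filter_append]
  rw [List.filter_eq_nil_iff.2 (by intro j hj; simp [PySem.List.mem_pyRange_one] at hj ⊢; omega)]
  rw [List.filter_eq_self.2 (by intro j hj; simp [PySem.List.mem_pyRange_one] at hj ⊢; omega)]
  rw [List.filter_eq_nil_iff.2 (by intro j hj; simp [PySem.List.mem_pyRange_one] at hj ⊢; omega)]
  simp

-- the per-exon core: A's range loop over the index dict = B's bounds filter over the segment table
theorem pv_exon (sites : List Int) (ex : Int × Int)
    (hs : sites.Pairwise (· < ·))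
    (h1 : ex.1 ∈ sites) (h2 : ex.2 + 1 ∈ sites) (hle : ex.1 ≤ ex.2 + 1) :
    (let idx1 := ((PySem.List.enumerate sites 0).foldl (fun d p => d.insert p.2 p.1) PySem.Dict.empty).getD ex.1 0
     let idx2 := ((PySem.List.enumerate sites 0).foldl (fun d p => d.insert p.2 p.1) PySem.Dict.empty).getD (ex.2 + 1) 0
     let pex := (PySem.List.pyRange idx1 idx2 1).foldl (fun pex i =>
        pex ++ [(PySem.List.pyGetD sites i 0, PySem.List.pyGetD sites (i + 1) 0 - 1)]) []
     if idx1 = idx2 then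
        pex ++ [(PySem.List.pyGetD sites idx1 0, PySem.List.pyGetD sites idx1 0 - 1)]
     else pex)
    =
    (let fl := ((sites.zip sites.tail).map (fun p => (p.1, p.2 - 1))).filter
        (fun sg => decide (ex.1 ≤ sg.1) && decide (sg.1 ≤ ex.2))
     if fl = [] then [(ex.1, ex.1 - 1)] else fl) := by
  have hnd : sites.Nodup := hs.imp (fun h => ne_of_lt h)
  obtain ⟨k1, hk1, he1⟩ := List.getElem_of_mem h1
  obtain ⟨k2, hk2, he2⟩ := List.getElem_of_mem h2
  have hmono : ∀ (p q : Nat) (hp : p < sites.length) (hq : q < sites.length),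
      p < q → sites[p] < sites[q] := by
    intro p q hp hq hpq
    exact List.pairwise_iff_getElem.1 hs p q hp hq hpq
  have hk12 : k1 ≤ k2 := by
    by_contra hlt
    have := hmono k2 k1 hk2 hk1 (by omega)
    omega
  have hidx1 : ((PySem.List.enumerate sites 0).foldl (fun d p => d.insert p.2 p.1) PySem.Dict.empty).getD ex.1 0 = (k1 : Int) := by
    rw [← he1, pv_dict_mem sites 0 _ hnd k1 hk1]; ring
  have hidx2 : ((PySem.List.enumerate sites 0).foldl (fun d p => d.insert p.2 p.1) PySem.Dict.empty).getD (ex.2 + 1) 0 = (k2 : Int) := by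
    rw [← he2, pv_dict_mem sites 0 _ hnd k2 hk2]; ring
  simp only [hidx1, hidx2]
  -- B's filtered table is the mapped index range [k1, k2)
  have hfl : ((sites.zip sites.tail).map (fun p => (p.1, p.2 - 1))).filter
        (fun sg => decide (ex.1 ≤ sg.1) && decide (sg.1 ≤ ex.2))
      = (PySem.List.pyRange (k1 : Int) (k2 : Int) 1).map
        (fun j => (PySem.List.pyGetD sites j 0, PySem.List.pyGetD sites (j + 1) 0 - 1)) := by
    rw [pv_zip_tail, List.map_map, List.filter_map]
    have hcg : (PySem.List.pyRange 0 ((sites.length : Int) - 1) 1).filter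
        ((fun sg => decide (ex.1 ≤ sg.1) && decide (sg.1 ≤ ex.2)) ∘
          ((fun p => (p.1, p.2 - 1)) ∘ fun j => (PySem.List.pyGetD sites j 0, PySem.List.pyGetD sites (j + 1) 0)))
        = (PySem.List.pyRange 0 ((sites.length : Int) - 1) 1).filter
            (fun j => decide ((k1 : Int) ≤ j) && decide (j < (k2 : Int))) := by
      apply List.filter_congr
      intro j hj
      rw [PySem.List.mem_pyRange_one] at hj
      have hjlen : j.toNat < sites.length := by omega
      have hget : PySem.List.pyGetD sites j 0 = sites[j.toNat] := by
        rw [PySem.List.pyGetD_eq_getElem sites 0 (by omega) (by omega)]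
      simp only [Function.comp, hget]
      have hiff1 : (ex.1 ≤ sites[j.toNat]) ↔ ((k1 : Int) ≤ j) := by
        constructor
        · intro hle'
          by_contra hn
          have : j.toNat < k1 := by omega
          have := hmono j.toNat k1 hjlen hk1 this
          omega
        · intro hj1
          rcases Nat.lt_or_ge j.toNat k1 with h | h
          · omega
          · rcases Nat.eq_or_lt_of_le h with h' | h'
            · subst h'; omega
            · have := hmono k1 j.toNat hk1 hjlen h'
              omega
      have hiff2 : (sites[j.toNat] ≤ ex.2) ↔ (j < (k2 : Int)) := by
        constructor
        · intro hle'
          by_contra hn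
          have h : k2 ≤ j.toNat := by omega
          rcases Nat.eq_or_lt_of_le h with h' | h'
          · subst h'; omega
          · have := hmono k2 j.toNat hk2 hjlen h'
            omega
        · intro hj2
          have : j.toNat < k2 := by omega
          have := hmono j.toNat k2 hjlen hk2 this
          omega
      simp [hiff1, hiff2]
    rw [hcg, pv_range_filter 0 ((sites.length : Int) - 1) k1 k2 (by positivity) (by exact_mod_cast hk12) (by omega)]
    simp [Function.comp]
  -- A's append loop is the same map
  rw [PySem.List.foldl_append_singleton_eq_map]
  simp only [hfl, List.nil_append]
  rcases Nat.eq_or_lt_of_le hk12 with heq | hlt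
  · subst heq
    rw [if_pos rfl]
    have hrnil : PySem.List.pyRange (k1 : Int) (k1 : Int) 1 = [] :=
      PySem.List.pyRange_one_eq_nil le_rfl
    rw [hrnil]
    have hget : PySem.List.pyGetD sites (k1 : Int) 0 = ex.1 := by
      rw [PySem.List.pyGetD_eq_getElem sites 0 (by positivity) (by exact_mod_cast hk1)]
      simpa using he1
    simp [hget]
  · rw [if_neg (by exact_mod_cast Nat.ne_of_lt hlt)]
    rw [if_neg ?_]
    rw [PySem.List.pyRange_one_cons (by exact_mod_cast hlt)]
    simp

-- per-gene equality
theorem pv_gene (gene : List (List (Int × Int)))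
    (h : ∀ iso ∈ gene, ∀ ex ∈ iso, ex.1 ≤ ex.2 + 1) :
    (let all_sites_set : PySem.Set Int :=
      gene.foldl (fun s iso => iso.foldl (fun s ex =>
          PySem.Set.add (PySem.Set.add s ex.1) (ex.2 + 1)) s) PySem.Set.empty
     let all_sites := PySem.List.sorted all_sites_set (fun x => x) false
     let idx_sites : PySem.Dict Int Int :=
      (PySem.List.enumerate all_sites 0).foldl (fun d p => d.insert p.2 p.1) PySem.Dict.empty
     gene.foldl (fun pc iso =>
      let pexon_chain := iso.foldl (fun chain ex =>
        let idx1 := idx_sites.getD ex.1 0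
        let idx2 := idx_sites.getD (ex.2 + 1) 0
        let pex_in_ex := (PySem.List.pyRange idx1 idx2 1).foldl (fun pex i =>
          pex ++ [(PySem.List.pyGetD all_sites i 0, PySem.List.pyGetD all_sites (i + 1) 0 - 1)]) []
        let pex_in_ex := if idx1 = idx2 then
            pex_in_ex ++ [(PySem.List.pyGetD all_sites idx1 0, PySem.List.pyGetD all_sites idx1 0 - 1)]
          else pex_in_ex
        chain ++ pex_in_ex) []
      pc ++ [pexon_chain]) [])
    =
    (let sites := PySem.List.sorted
      (PySem.Set.ofList (gene.flatMap (fun iso => iso.flatMap (fun ex => [ex.1, ex.2 + 1]))))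
      (fun x => x) false
     let segs := (sites.zip sites.tail).map (fun p => (p.1, p.2 - 1))
     gene.map (fun iso => iso.flatMap (fun ex =>
      let fl := segs.filter (fun sg => decide (ex.1 ≤ sg.1) && decide (sg.1 ≤ ex.2))
      if fl = [] then [(ex.1, ex.1 - 1)] else fl))) := by
  simp only [pv_setfold]
  set flat := gene.flatMap (fun iso => iso.flatMap (fun ex => [ex.1, ex.2 + 1])) with hflat
  set sites := PySem.List.sorted (PySem.Set.ofList flat) (fun x => x) false with hsites
  have hsorted : sites.Pairwise (· < ·) := PySem.List.sorted_ofList_pairwise_lt flat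
  have hmem : ∀ x, x ∈ flat → x ∈ sites := by
    intro x hx
    rw [hsites, PySem.List.mem_sorted, PySem.Set.mem_ofList]
    exact hx
  rw [PySem.List.foldl_append_singleton_eq_map]
  simp only [List.nil_append]
  apply List.map_congr_left
  intro iso hiso
  rw [PySem.List.foldl_append_eq_flatMap]
  simp only [List.nil_append]
  apply List.flatMap_congr
  intro ex hex
  have hx1 : ex.1 ∈ sites := by
    apply hmem; rw [hflat]
    simp only [List.mem_flatMap]
    exact ⟨iso, hiso, ex, hex, by simp⟩
  have hx2 : ex.2 + 1 ∈ sites := by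
    apply hmem; rw [hflat]
    simp only [List.mem_flatMap]
    exact ⟨iso, hiso, ex, hex, by simp⟩
  exact pv_exon sites ex hsorted hx1 hx2 (h iso hiso ex hex)

-- ===== VERDICT (by name: the statement is the Claim_ definition above) =====
theorem get_partial_any_chain_matrix_py_spec : Claim_equal_get_partial_any_chain_matrix_py := by
  intro m _ hpre
  unfold Spec_get_partial_any_chain_matrix_py
  unfold get_partial_any_chain_matrix_py get_partial_any_chain_matrix_py_alt
  rw [PySem.List.foldl_append_singleton_eq_map, PySem.List.foldl_append_singleton_eq_map]
  simp only [List.nil_append]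
  apply List.map_congr_left
  intro gene hgene
  unfold Pre_get_partial_any_chain_matrix_py at hpre
  simp only [List.all_eq_true, decide_eq_true_eq] at hpre
  exact pv_gene gene (hpre gene hgene)
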